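-- pv_equiv track=rewrite | github.com/wells-wood-research/drFrankenstein | src/drCapper/capping_protocol.py | decide_atom_to_delete_C_terminal_proton
-- ===== SOURCE A (Python) =====
-- def  decide_atom_to_delete_C_terminal_proton(atomNames: list) -> str:
--     """
--     From a list of atom names, decide which one to delete in relation to the C-Terminal proton
--
--     Args:
--         atomNames (list): list of atom names
--     Returns:
--         atomToDelete (str): name of the atom to delete (can be "None")
--
--     """
--     atomNames = sorted([atomName for atomName in atomNames if atomName.startswith("H")])
--     if len(atomNames) == 1:
--         atomToDelete = atomNames[0]
--     elif len(atomNames) == 2: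
--         atomToDelete = atomNames[-1]
--     else:
--         atomToDelete = "None"
--
--     return atomToDelete
-- ===== SOURCE B (Python) =====
-- def decide_atom_to_delete_C_terminal_proton(atomNames: list) -> str:
--     count = 0
--     best = None
--     for name in atomNames:
--         if name.startswith("H"):
--             count += 1
--             if best is None or best < name:
--                 best = name
--     return best if 1 <= count <= 2 else "None"
-- ===== Notes on version B (the rewrite author's own statement) =====
-- stated objective: alternative
-- what changed: Replaces filter-then-sort-then-index with a single pass keeping only a count and a running maximum of H-names; the max equals the sorted list's relevant element for counts 1 and 2.
import Mathlib
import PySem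

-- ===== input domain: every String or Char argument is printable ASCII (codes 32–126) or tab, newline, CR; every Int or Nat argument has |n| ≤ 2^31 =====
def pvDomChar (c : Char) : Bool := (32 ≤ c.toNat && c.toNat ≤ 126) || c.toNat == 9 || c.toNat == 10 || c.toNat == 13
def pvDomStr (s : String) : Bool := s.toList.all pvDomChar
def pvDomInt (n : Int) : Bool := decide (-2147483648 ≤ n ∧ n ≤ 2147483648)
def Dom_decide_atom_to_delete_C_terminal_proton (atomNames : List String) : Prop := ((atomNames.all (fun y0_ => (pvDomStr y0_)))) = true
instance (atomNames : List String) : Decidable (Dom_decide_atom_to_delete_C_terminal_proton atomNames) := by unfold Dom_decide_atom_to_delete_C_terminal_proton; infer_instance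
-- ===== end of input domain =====

-- B replaces A's filter-then-sort-then-index with a single pass keeping a count and a running maximum of H-names (alternative algorithm, same cost).
-- ===== PORT A =====
def decide_atom_to_delete_C_terminal_proton (atomNames : List String) : String :=
  let hs := PySem.List.sorted (atomNames.filter (fun atomName => PySem.Str.startswith atomName "H")) (fun x => x) false
  if hs.length = 1 then PySem.List.pyGetD hs 0 "None"
  else if hs.length = 2 then PySem.List.pyGetD hs (-1) "None"
  else "None"

-- ===== PORT B =====
def pvAltStep (s : Nat × Option String) (name : String) : Nat × Option String :=
  if PySem.Str.startswith name "H" then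
    (s.1 + 1, match s.2 with
              | none => some name
              | some b => if b < name then some name else some b)
  else s

def decide_atom_to_delete_C_terminal_proton_alt (atomNames : List String) : String :=
  let st := atomNames.foldl pvAltStep (0, none)
  if 1 ≤ st.1 ∧ st.1 ≤ 2 then
    match st.2 with
    | some b => b
    | none => "None"
  else "None"

-- ===== PRECONDITION & SPEC =====
def Spec_decide_atom_to_delete_C_terminal_proton (atomNames : List String) (out : String) : Prop := out = decide_atom_to_delete_C_terminal_proton_alt atomNames
instance (atomNames : List String) (out : String) : Decidable (Spec_decide_atom_to_delete_C_terminal_proton atomNames out) := by unfold Spec_decide_atom_to_delete_C_terminal_proton; infer_instance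

-- ===== CLAIM (what is proved, stated in full; the proofs are below) =====
def Claim_equal_decide_atom_to_delete_C_terminal_proton : Prop := ∀ (atomNames : List String), Dom_decide_atom_to_delete_C_terminal_proton atomNames → Spec_decide_atom_to_delete_C_terminal_proton atomNames (decide_atom_to_delete_C_terminal_proton atomNames)

-- ===== LEMMAS AND PROOFS =====

def pvUpd (ob : Option String) (name : String) : Option String :=
  match ob with
  | none => some name
  | some b => if b < name then some name else some b

theorem pvFold_filter (xs : List String) (s : Nat × Option String) :
    xs.foldl pvAltStep s
      = (xs.filter (fun a => PySem.Str.startswith a "H")).foldl pvAltStep s := by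
  induction xs generalizing s with
  | nil => rfl
  | cons x t ih =>
    by_cases h : PySem.Chars.startswith x.toList ['H'] = true
    · simp [List.foldl_cons, h, ih]
    · have hx : pvAltStep s x = s := by simp [pvAltStep, h]
      simp [List.foldl_cons, h, hx, ih]

theorem pvFold_split (l : List String) (c : Nat) (ob : Option String) :
    l.foldl pvAltStep (c, ob)
      = (c + (l.filter (fun a => PySem.Str.startswith a "H")).length,
         (l.filter (fun a => PySem.Str.startswith a "H")).foldl pvUpd ob) := by
  induction l generalizing c ob with
  | nil => simp
  | cons x t ih =>
    by_cases h : PySem.Chars.startswith x.toList ['H'] = true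
    · have hx : pvAltStep (c, ob) x = (c + 1, pvUpd ob x) := by simp [pvAltStep, h, pvUpd]
      simp only [List.foldl_cons, List.filter_cons]
      rw [hx, ih]
      simp [h]
      omega
    · have hx : pvAltStep (c, ob) x = (c, ob) := by simp [pvAltStep, h]
      simp only [List.foldl_cons, List.filter_cons]
      rw [hx, ih]
      simp [h]

theorem pv_main (atomNames : List String) :
    decide_atom_to_delete_C_terminal_proton atomNames
      = decide_atom_to_delete_C_terminal_proton_alt atomNames := by
  unfold decide_atom_to_delete_C_terminal_proton decide_atom_to_delete_C_terminal_proton_alt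
  rw [pvFold_filter, pvFold_split]
  rcases hf : atomNames.filter (fun a => PySem.Str.startswith a "H") with _ | ⟨x, _ | ⟨y, _ | ⟨z, t⟩⟩⟩
  · simp [PySem.List.sorted]
  · have hpx : PySem.Chars.startswith x.toList ['H'] = true := by
      have hx : x ∈ atomNames.filter (fun a => PySem.Str.startswith a "H") := by rw [hf]; simp
      simpa using (List.mem_filter.mp hx).2
    have hs : PySem.List.sorted [x] (fun x => x) = [x] :=
      PySem.List.sorted_eq_self_of_pairwise [x] (fun x => x) (by simp)
    simp [hs, hpx, pvUpd, PySem.List.pyGetD_zero_cons]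
  · have hpx : PySem.Chars.startswith x.toList ['H'] = true := by
      have hx : x ∈ atomNames.filter (fun a => PySem.Str.startswith a "H") := by rw [hf]; simp
      simpa using (List.mem_filter.mp hx).2
    have hpy : PySem.Chars.startswith y.toList ['H'] = true := by
      have hy : y ∈ atomNames.filter (fun a => PySem.Str.startswith a "H") := by rw [hf]; simp
      simpa using (List.mem_filter.mp hy).2
    by_cases hxy : y < x
    · have hs : PySem.List.sorted [x, y] (fun x => x) = [y, x] :=
        PySem.List.sorted_eq_of_perm_of_pairwise_lt [x, y] [y, x] (fun x => x) (List.Perm.swap x y [])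
          (by simpa using hxy)
      have hlt : ¬ x < y := lt_asymm hxy
      have hg : PySem.List.pyGetD [y, x] (-1) "None" = x := by
        simpa using PySem.List.pyGetD_neg_one (xs := [y, x]) (d := "None") (by simp)
      simp [hs, hpx, hpy, pvUpd, hlt, hg]
    · have hle : x ≤ y := le_of_not_gt hxy
      have hs : PySem.List.sorted [x, y] (fun x => x) = [x, y] :=
        PySem.List.sorted_eq_self_of_pairwise [x, y] (fun x => x) (by simpa using hle)
      have hg : PySem.List.pyGetD [x, y] (-1) "None" = y := by
        simpa using PySem.List.pyGetD_neg_one (xs := [x, y]) (d := "None") (by simp)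
      rcases lt_or_eq_of_le hle with hlt | heq
      · simp [hs, hpx, hpy, pvUpd, hlt, hg]
      · subst heq
        simp [hs, hpx, pvUpd, hg]
  · have hall : ∀ a ∈ (x :: y :: z :: t), PySem.Str.startswith a "H" = true := by
      intro a ha
      have : a ∈ atomNames.filter (fun a => PySem.Str.startswith a "H") := by rw [hf]; exact ha
      exact (List.mem_filter.mp this).2
    have hfl : (x :: y :: z :: t).filter (fun a => PySem.Str.startswith a "H") = x :: y :: z :: t :=
      List.filter_eq_self.mpr (fun a ha => hall a ha)
    have hlen : (PySem.List.sorted (x :: y :: z :: t) (fun x => x) false).length = t.length + 3 := by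
      simp [PySem.List.length_sorted]
    simp only [hfl, hlen]
    have h1 : ¬ (t.length + 3 = 1) := by omega
    have h2 : ¬ (t.length + 3 = 2) := by omega
    have h3 : ¬ (1 ≤ t.length + 3 ∧ t.length + 3 ≤ 2) := by omega
    simp [h1, h2]

-- ===== VERDICT (by name: the statement is the Claim_ definition above) =====
theorem decide_atom_to_delete_C_terminal_proton_spec : Claim_equal_decide_atom_to_delete_C_terminal_proton := by
  intro atomNames _
  exact pv_main atomNames
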